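-- pv_equiv track=rewrite | github.com/rgwohlbold/quine-mccluskey-optimization | generate_merge_order.py | implicant_pattern_to_index
-- ===== SOURCE A (Python) =====
-- import math
--
-- def implicant_pattern_to_index(pattern: str):
--     num_bits = len(pattern)
--     num_dashes = 0
--     section_offset = 0
--     for c in pattern:
--         if c == '-':
--             section_offset += math.comb(num_bits, num_dashes) * (2 ** (num_bits - num_dashes))
--             num_dashes += 1
--     chunk_offset = 0
--     dashes_remaining = num_dashes
--     for i in range(num_bits-1, -1, -1):
--         if pattern[i] == '-':
--             dashes_remaining -= 1
--         elif dashes_remaining >= 1: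
--             chunk_offset += math.comb(i, dashes_remaining-1)
--     chunk_offset *= 2 ** (num_bits - num_dashes)
--
--     return section_offset + chunk_offset
-- ===== SOURCE B (Python) =====
-- import math
--
-- def implicant_pattern_to_index(pattern: str):
--     n = len(pattern)
--     dashes = [i for i, c in enumerate(pattern) if c == '-']
--     d = len(dashes)
--     section = sum(math.comb(n, k) * 2 ** (n - k) for k in range(d))
--     chunk = 0
--     for j, (q, q_next) in enumerate(zip(dashes, dashes[1:] + [n]), start=1):
--         chunk += math.comb(q_next, j) - math.comb(q + 1, j)
--     return section + chunk * 2 ** (n - d)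
-- ===== Notes on version B (the rewrite author's own statement) =====
-- stated objective: alternative
-- what changed: B replaces A's backward scan over every index (adding one binomial per non-dash position) by a hockey-stick telescoped sum over the dash positions only, computed from the dash-position list built in one forward pass.
import Mathlib
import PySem

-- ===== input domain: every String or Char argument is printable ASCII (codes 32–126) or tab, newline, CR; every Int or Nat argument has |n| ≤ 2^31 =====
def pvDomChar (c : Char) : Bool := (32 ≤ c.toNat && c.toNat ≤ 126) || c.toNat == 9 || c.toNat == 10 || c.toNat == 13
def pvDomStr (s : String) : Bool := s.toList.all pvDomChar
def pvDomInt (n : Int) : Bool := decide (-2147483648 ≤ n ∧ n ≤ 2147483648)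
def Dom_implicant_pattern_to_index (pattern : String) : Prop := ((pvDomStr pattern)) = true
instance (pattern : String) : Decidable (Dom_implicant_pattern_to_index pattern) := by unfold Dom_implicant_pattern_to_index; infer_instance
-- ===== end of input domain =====

-- B replaces A's per-index backward scan by a hockey-stick sum over the dash positions only (alternative decomposition).


-- ===== PORT A =====
-- math.comb(a, b) with nonnegative arguments is Nat.choose a.toNat b.toNat (exact: all comb
-- arguments below are counters/indices that never go negative); 2 ** e with e ≥ 0 is 2 ^ e.toNat.
def implicant_pattern_to_index (pattern : String) : Int :=
  let num_bits : Int := PySem.Str.len pattern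
  -- for c in pattern: state (num_dashes, section_offset)
  let st1 : Int × Int := pattern.toList.foldl
    (fun (st : Int × Int) c =>
      if c = '-' then
        (st.1 + 1, st.2 + (Nat.choose num_bits.toNat st.1.toNat : Int) * 2 ^ (num_bits - st.1).toNat)
      else st)
    (0, 0)
  let num_dashes : Int := st1.1
  let section_offset : Int := st1.2
  -- for i in range(num_bits-1, -1, -1): state (chunk_offset, dashes_remaining)
  let st2 : Int × Int := (PySem.List.pyRange (num_bits - 1) (-1) (-1)).foldl
    (fun (st : Int × Int) i =>
      match PySem.Str.pyGet? pattern i with   -- pattern[i]; i is always in range, the none branch is unreachable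
      | some c =>
        if c = '-' then (st.1, st.2 - 1)
        else if 1 ≤ st.2 then (st.1 + (Nat.choose i.toNat (st.2 - 1).toNat : Int), st.2)
        else st
      | none => st)
    (0, num_dashes)
  let chunk_offset : Int := st2.1 * 2 ^ (num_bits - num_dashes).toNat
  section_offset + chunk_offset

-- ===== PORT B =====
def implicant_pattern_to_index_alt (pattern : String) : Int :=
  let n : Int := PySem.Str.len pattern
  -- dashes = [i for i, c in enumerate(pattern) if c == '-']
  let dashes : List Int := (PySem.List.enumerate pattern.toList 0).filterMap
    (fun p => if p.2 = '-' then some p.1 else none)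
  let d : Int := PySem.List.len dashes
  -- section = sum(math.comb(n, k) * 2 ** (n - k) for k in range(d))
  let sec : Int := ((PySem.List.pyRange 0 d 1).map
    (fun k => (Nat.choose n.toNat k.toNat : Int) * 2 ^ (n - k).toNat)).sum
  -- for j, (q, q_next) in enumerate(zip(dashes, dashes[1:] + [n]), start=1): state (j, chunk)
  let chunk : Int := ((dashes.zip (dashes.drop 1 ++ [n])).foldl
    (fun (st : Int × Int) qq =>
      (st.1 + 1, st.2 + ((Nat.choose qq.2.toNat st.1.toNat : Int) - (Nat.choose (qq.1 + 1).toNat st.1.toNat : Int))))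
    (1, 0)).2
  sec + chunk * 2 ^ (n - d).toNat

-- ===== PRECONDITION & SPEC =====
def Spec_implicant_pattern_to_index (pattern : String) (out : Int) : Prop := out = implicant_pattern_to_index_alt pattern
instance (pattern : String) (out : Int) : Decidable (Spec_implicant_pattern_to_index pattern out) := by unfold Spec_implicant_pattern_to_index; infer_instance

-- ===== CLAIM (what is proved, stated in full; the proofs are below) =====
def Claim_equal_implicant_pattern_to_index : Prop := ∀ (pattern : String), Dom_implicant_pattern_to_index pattern → Spec_implicant_pattern_to_index pattern (implicant_pattern_to_index pattern)

-- ===== LEMMAS AND PROOFS =====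

-- term of the section sum
def pvTerm (n k : Int) : Int := (Nat.choose n.toNat k.toNat : Int) * 2 ^ (n - k).toNat

-- section sum Σ_{j<m} pvTerm n (c+j), peeled from the left
def pvSec (n : Int) (m : Nat) (c : Int) : Int :=
  match m with
  | 0 => 0
  | m + 1 => pvTerm n c + pvSec n m (c + 1)

-- forward characterisation of A's second loop
def pvS (l : List Char) (i c : Int) : Int :=
  match l with
  | [] => 0
  | x :: r =>
    if x = '-' then pvS r (i + 1) (c + 1)
    else (if 1 ≤ c then (Nat.choose i.toNat (c - 1).toNat : Int) else 0) + pvS r (i + 1) c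

-- recursion form of A's backward fold (foldr over indices)
def pvStep (pattern : String) (st : Int × Int) (i : Int) : Int × Int :=
  match PySem.Str.pyGet? pattern i with
  | some c =>
    if c = '-' then (st.1, st.2 - 1)
    else if 1 ≤ st.2 then (st.1 + (Nat.choose i.toNat (st.2 - 1).toNat : Int), st.2)
    else st
  | none => st

def pvRecA (pattern : String) (l : List Char) (i : Int) (st : Int × Int) : Int × Int :=
  match l with
  | [] => st
  | _ :: r => pvStep pattern (pvRecA pattern r (i + 1) st) i

-- dash positions of l, offset i
def pvDash (l : List Char) (i : Int) : List Int :=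
  match l with
  | [] => []
  | x :: r => if x = '-' then i :: pvDash r (i + 1) else pvDash r (i + 1)

-- first dash position of l (offset i), or the end position
def pvNxt (l : List Char) (i : Int) : Int :=
  match l with
  | [] => i
  | x :: r => if x = '-' then i else pvNxt r (i + 1)

-- B's chunk sum as a recursion on the dash-position list
def pvCB (qs : List Int) (j n : Int) : Int :=
  match qs with
  | [] => 0
  | q :: rest => ((Nat.choose (rest.headD n).toNat j.toNat : Int) - (Nat.choose (q + 1).toNat j.toNat : Int)) + pvCB rest (j + 1) n

theorem pvSec_succ_right (n : Int) (m : Nat) (c : Int) :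
    pvSec n (m + 1) c = pvSec n m c + pvTerm n (c + m) := by
  induction m generalizing c with
  | zero => simp [pvSec]
  | succ m ih =>
    rw [pvSec, ih, pvSec]
    push_cast
    ring_nf

-- first loop of A
theorem pvLoop1 (n : Int) (l : List Char) (c s : Int) :
    l.foldl (fun (st : Int × Int) ch =>
      if ch = '-' then (st.1 + 1, st.2 + (Nat.choose n.toNat st.1.toNat : Int) * 2 ^ (n - st.1).toNat)
      else st) (c, s)
    = (c + (l.count '-' : Int), s + pvSec n (l.count '-') c) := by
  induction l generalizing c s with
  | nil => simp [pvSec]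
  | cons x r ih =>
    by_cases hx : x = '-'
    · subst hx
      simp only [List.foldl_cons, List.count_cons_self, ih, pvSec, pvTerm]
      refine Prod.ext ?_ ?_ <;> simp <;> ring
    · simp only [List.foldl_cons, if_neg hx, ih]
      rw [List.count_cons_of_ne (by simpa using hx)]

-- B's section sum equals pvSec
theorem pvSecB (n : Int) (m : Nat) :
    ((PySem.List.pyRange 0 (m : Int) 1).map (fun k => pvTerm n k)).sum = pvSec n m 0 := by
  rw [PySem.List.pyRange_zero_natCast]
  induction m with
  | zero => simp [pvSec]
  | succ m ih =>
    rw [List.range_succ, List.map_append, List.map_append, List.sum_append, ih, pvSec_succ_right]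
    simp

-- the backward range-fold is pvRecA
theorem pvFold2 (pattern : String) (l : List Char) (i0 : Int) (h0 : 0 ≤ i0)
    (hget : ∀ k : Nat, (hk : k < l.length) → PySem.Str.pyGet? pattern (i0 + k) = some l[k]) (st : Int × Int) :
    (PySem.List.pyRange i0 (i0 + l.length) 1).foldr (fun i s => pvStep pattern s i) st
    = pvRecA pattern l i0 st := by
  induction l generalizing i0 with
  | nil => simp [pvRecA, PySem.List.pyRange_one_eq_nil le_rfl]
  | cons x r ih =>
    have hnn : (0:Int) ≤ (r.length : Int) := Int.natCast_nonneg _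
    have hlen : i0 + ((x :: r).length : Int) = (i0 + 1) + (r.length : Int) := by rw [List.length_cons]; push_cast; ring
    have hg : ∀ k : Nat, (hk : k < r.length) → PySem.Str.pyGet? pattern ((i0 + 1) + k) = some r[k] := by
      intro k hk
      have h := hget (k + 1) (by simpa using Nat.succ_lt_succ hk)
      have he : i0 + ((k + 1 : Nat) : Int) = (i0 + 1) + (k : Int) := by push_cast; ring
      rw [he] at h
      simpa using h
    rw [hlen, PySem.List.pyRange_one_cons (by omega), List.foldr_cons,
      ih (i0 + 1) (by omega) hg, pvRecA]

-- pvRecA from rem = c + (#dashes of l) computes pvS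
theorem pvRecA_eq (pattern : String) (l : List Char) (i c a : Int) (hi : 0 ≤ i) (hc : 0 ≤ c)
    (hget : ∀ k : Nat, (hk : k < l.length) → PySem.Str.pyGet? pattern (i + k) = some l[k]) :
    pvRecA pattern l i (a, c + (l.count '-' : Int)) = (a + pvS l i c, c) := by
  induction l generalizing i c a with
  | nil => simp [pvRecA, pvS]
  | cons x r ih =>
    have hx0 : PySem.Str.pyGet? pattern i = some x := by simpa using hget 0 (by simp)
    have hg : ∀ k : Nat, (hk : k < r.length) → PySem.Str.pyGet? pattern ((i + 1) + k) = some r[k] := by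
      intro k hk
      have h := hget (k + 1) (by simpa using Nat.succ_lt_succ hk)
      have he : i + ((k + 1 : Nat) : Int) = (i + 1) + (k : Int) := by push_cast; ring
      rw [he] at h
      simpa using h
    by_cases hx : x = '-'
    · have hcnt : c + ((x :: r).count '-' : Int) = (c + 1) + (r.count '-' : Int) := by
        subst hx; rw [List.count_cons_self]; push_cast; ring
      rw [pvRecA, hcnt, ih (i + 1) (c + 1) a (by omega) (by omega) hg, pvStep, hx0]
      simp [pvS, hx]
    · have hcnt : ((x :: r).count '-' : Int) = (r.count '-' : Int) := by
        rw [List.count_cons_of_ne (by simpa using hx)]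
      rw [pvRecA, hcnt, ih (i + 1) c a (by omega) hc hg, pvStep, hx0]
      simp only [pvS, if_neg hx]
      by_cases h1 : 1 ≤ c
      · simp only [if_pos h1]
        refine Prod.ext ?_ ?_
        · simp
          ring
        · simp
      · simp [if_neg h1]

-- B's filterMap over enumerate is pvDash
theorem pvDash_enum (l : List Char) (s : Int) :
    (PySem.List.enumerate l s).filterMap (fun p => if p.2 = '-' then some p.1 else none) = pvDash l s := by
  induction l generalizing s with
  | nil => simp [PySem.List.enumerate_nil, pvDash]
  | cons x r ih => by_cases hx : x = '-' <;> simp [PySem.List.enumerate_cons, pvDash, hx, ih]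

theorem pvDash_length (l : List Char) (i : Int) : (pvDash l i).length = l.count '-' := by
  induction l generalizing i with
  | nil => simp [pvDash]
  | cons x r ih =>
    by_cases hx : x = '-'
    · simp [pvDash, hx, ih]
    · simp [pvDash, hx, ih, List.count_cons_of_ne (by simpa using hx)]

theorem pvDash_headD (l : List Char) (i : Int) :
    (pvDash l i).headD (i + l.length) = pvNxt l i := by
  induction l generalizing i with
  | nil => simp [pvDash, pvNxt]
  | cons x r ih =>
    by_cases hx : x = '-'
    · simp [pvDash, pvNxt, hx]
    · simpa [pvDash, pvNxt, hx, add_assoc, add_comm, add_left_comm] using ih (i + 1)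

-- B's zip fold is pvCB
theorem pvZipFold (qs : List Int) (n j0 a : Int) :
    ((qs.zip (qs.drop 1 ++ [n])).foldl
      (fun (st : Int × Int) qq =>
        (st.1 + 1, st.2 + ((Nat.choose qq.2.toNat st.1.toNat : Int) - (Nat.choose (qq.1 + 1).toNat st.1.toNat : Int))))
      (j0, a))
    = (j0 + qs.length, a + pvCB qs j0 n) := by
  induction qs generalizing j0 a with
  | nil => simp [pvCB]
  | cons q rest ih =>
    cases rest with
    | nil =>
      simp only [List.drop_succ_cons, List.drop_zero, List.nil_append,
        List.zip_cons_cons, List.zip_nil_right, List.foldl_cons, List.foldl_nil, pvCB,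
        List.headD_nil, List.length_cons, List.length_nil]
      refine Prod.ext ?_ ?_ <;> simp
    | cons q' r' =>
      simp only [List.drop_succ_cons, List.drop_zero, List.cons_append, List.zip_cons_cons,
        List.foldl_cons]
      rw [show (r' ++ [n] : List Int) = (q' :: r').drop 1 ++ [n] from by simp, ih]
      simp only [pvCB, List.headD_cons, List.length_cons]
      refine Prod.ext ?_ ?_
      · simp
        omega
      · simp
        ring

-- Pascal, in the Int-cast form used by the folds
theorem pvPascal (i c : Int) (hi : 0 ≤ i) (hc : 1 ≤ c) :
    (Nat.choose i.toNat (c - 1).toNat : Int) + Nat.choose i.toNat c.toNat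
    = Nat.choose (i + 1).toNat c.toNat := by
  have h1 : (i + 1).toNat = i.toNat + 1 := by omega
  have h2 : c.toNat = (c - 1).toNat + 1 := by omega
  rw [h1, h2, Nat.choose_succ_succ]
  push_cast
  ring

-- the hockey-stick reformulation: pvS = pvCB over dash positions
theorem pvMain (l : List Char) (i c : Int) (hi : 0 ≤ i) (hc : 0 ≤ c) :
    pvS l i c = pvCB (pvDash l i) (c + 1) (i + l.length)
      + (if 1 ≤ c then (Nat.choose (pvNxt l i).toNat c.toNat : Int) - Nat.choose i.toNat c.toNat else 0) := by
  induction l generalizing i c with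
  | nil =>
    simp only [pvS, pvDash, pvCB, pvNxt]
    split_ifs <;> ring
  | cons x r ih =>
    have hN : i + ((x :: r).length : Int) = (i + 1) + (r.length : Int) := by
      rw [List.length_cons]; push_cast; ring
    by_cases hx : x = '-'
    · rw [pvS, if_pos hx, ih (i + 1) (c + 1) (by omega) (by omega), pvDash, if_pos hx, hN,
        pvCB, pvDash_headD, pvNxt, if_pos hx, if_pos (by omega : (1:Int) ≤ c + 1)]
      split_ifs <;> ring
    · rw [pvS, if_neg hx, ih (i + 1) c (by omega) hc, pvDash, if_neg hx, hN,
        pvNxt, if_neg hx]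
      by_cases h1 : 1 ≤ c
      · rw [if_pos h1, if_pos h1, if_pos h1]
        have hp := pvPascal i c hi h1
        linarith
      · simp [if_neg h1]

-- ===== VERDICT (by name: the statement is the Claim_ definition above) =====
theorem implicant_pattern_to_index_spec : Claim_equal_implicant_pattern_to_index := by
  intro pattern _
  unfold Spec_implicant_pattern_to_index
  have hn : PySem.Str.len pattern = (pattern.toList.length : Int) := by simp
  have hget : ∀ k : Nat, (hk : k < pattern.toList.length) →
      PySem.Str.pyGet? pattern ((0:Int) + k) = some pattern.toList[k] := by
    intro k hk
    simp
  have hr : PySem.List.pyRange (PySem.Str.len pattern - 1) (-1) (-1)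
      = (PySem.List.pyRange 0 ((0:Int) + pattern.toList.length) 1).reverse := by
    rw [PySem.List.pyRange_neg_one_eq_reverse, hn]
    norm_num
  have h2 : ∀ st : Int × Int,
      (PySem.List.pyRange (PySem.Str.len pattern - 1) (-1) (-1)).foldl
        (fun (st : Int × Int) i =>
          match PySem.Str.pyGet? pattern i with
          | some c =>
            if c = '-' then (st.1, st.2 - 1)
            else if 1 ≤ st.2 then (st.1 + (Nat.choose i.toNat (st.2 - 1).toNat : Int), st.2)
            else st
          | none => st) st
      = pvRecA pattern pattern.toList 0 st := by
    intro st
    rw [hr, List.foldl_reverse]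
    exact pvFold2 pattern pattern.toList 0 le_rfl hget st
  have hA : implicant_pattern_to_index pattern
      = (0 + pvSec (PySem.Str.len pattern) (pattern.toList.count '-') 0)
        + (0 + pvS pattern.toList 0 0)
          * 2 ^ (PySem.Str.len pattern - (0 + (pattern.toList.count '-' : Int))).toNat := by
    simp only [implicant_pattern_to_index]
    rw [pvLoop1, h2, pvRecA_eq pattern pattern.toList 0 0 0 le_rfl le_rfl hget]
  have hB : implicant_pattern_to_index_alt pattern
      = pvSec (PySem.Str.len pattern) (pattern.toList.count '-') 0
        + (0 + pvCB (pvDash pattern.toList 0) 1 (PySem.Str.len pattern))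
          * 2 ^ (PySem.Str.len pattern - (pattern.toList.count '-' : Int)).toNat := by
    simp only [implicant_pattern_to_index_alt]
    rw [pvDash_enum]
    have hd : PySem.List.len (pvDash pattern.toList 0) = (pattern.toList.count '-' : Int) := by
      simp [pvDash_length]
    rw [hd,
      show (fun (k : Int) => (Nat.choose (PySem.Str.len pattern).toNat k.toNat : Int)
          * 2 ^ (PySem.Str.len pattern - k).toNat)
        = (fun k => pvTerm (PySem.Str.len pattern) k) from rfl,
      pvSecB, pvZipFold]
  rw [hA, hB]
  have hm := pvMain pattern.toList 0 0 le_rfl le_rfl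
  rw [if_neg (by omega : ¬ (1:Int) ≤ 0)] at hm
  rw [hm, hn]
  ring_nf
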